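-- pv_equiv track=rewrite | github.com/RRam2020/Python-Board-Game-Beta | tools/board.py | boardX
-- ===== SOURCE A (Python) =====
-- def boardX(pos):
--     posx = pos
--     if pos < 10:
--         x = pos
--     elif  pos >= 10 and pos <20:
--         x = 10
--     elif  pos >= 20 and pos < 30:
--         x=30-posx
--     elif  pos >= 30 and pos < 40:
--         x=0
--     elif pos >= 40:
--         return boardX(pos-40)
--     else:
--         x=5
--
--     return x*50
-- ===== SOURCE B (Python) =====
-- def boardX(pos):
--     # Flat version: reduce positions >= 40 by modulo instead of recursing,
--     # then map the reduced position through its band directly.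
--     if pos >= 40:
--         pos = pos % 40
--     if pos < 10:
--         return pos * 50
--     if pos < 20:
--         return 500
--     if pos < 30:
--         return (30 - pos) * 50
--     return 0
-- ===== Notes on version B (the rewrite author's own statement) =====
-- stated objective: simpler
-- what changed: Replaces A's unbounded recursion on pos-40 by a single modulo-40 reduction followed by a flat band lookup that returns directly.
-- outside the precondition, e.g. on boardX(38001): A returns 50, B returns 50; on boardX(39000): A returns 0, B returns 0
import Mathlib
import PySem

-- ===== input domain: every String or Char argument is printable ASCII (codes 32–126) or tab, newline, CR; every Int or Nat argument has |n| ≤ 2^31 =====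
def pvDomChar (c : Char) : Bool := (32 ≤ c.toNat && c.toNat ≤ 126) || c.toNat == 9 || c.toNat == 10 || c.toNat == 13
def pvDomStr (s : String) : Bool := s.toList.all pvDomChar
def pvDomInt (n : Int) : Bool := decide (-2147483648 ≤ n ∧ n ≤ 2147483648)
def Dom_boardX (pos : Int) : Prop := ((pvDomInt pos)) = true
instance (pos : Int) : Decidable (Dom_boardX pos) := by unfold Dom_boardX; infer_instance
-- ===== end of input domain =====

-- B replaces A's unbounded recursion on pos-40 by one modulo-40 reduction and a flat band lookup (objective: simpler).


-- ===== PORT A =====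
def boardX (pos : Int) : Int :=
  let posx := pos
  if pos < 10 then pos * 50
  else if pos ≥ 10 ∧ pos < 20 then 10 * 50
  else if pos ≥ 20 ∧ pos < 30 then (30 - posx) * 50
  else if pos ≥ 30 ∧ pos < 40 then 0 * 50
  else if pos ≥ 40 then boardX (pos - 40)
  else 5 * 50
termination_by pos.toNat
decreasing_by omega

-- ===== PORT B =====
def boardX_alt (pos : Int) : Int :=
  let p := if pos ≥ 40 then PySem.Int.mod pos 40 else pos
  if p < 10 then p * 50
  else if p < 20 then 500
  else if p < 30 then (30 - p) * 50
  else 0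

-- ===== PRECONDITION & SPEC =====
-- Pre_ excludes large positive positions: A makes one recursive call per step of 40, so such
-- inputs exhaust CPython's recursion limit and raise RecursionError; the bound leaves a safety
-- margin below the exact interpreter-dependent threshold, so a few returning inputs fall outside
-- Pre_ too (see the cites in the claim).
def Pre_boardX (pos : Int) : Prop := pos ≤ 38000
instance (pos : Int) : Decidable (Pre_boardX pos) := by unfold Pre_boardX; infer_instance
def pvWitness_boardX : Int := 97
def Spec_boardX (pos : Int) (out : Int) : Prop := out = boardX_alt pos
instance (pos : Int) (out : Int) : Decidable (Spec_boardX pos out) := by unfold Spec_boardX; infer_instance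

-- ===== CLAIM (what is proved, stated in full; the proofs are below) =====
def Claim_equal_boardX : Prop := ∀ (pos : Int), Dom_boardX pos → Pre_boardX pos → Spec_boardX pos (boardX pos)

-- ===== LEMMAS AND PROOFS =====

-- one modulo-40 step on B's side
theorem boardX_alt_step (pos : Int) (h : 40 ≤ pos) :
    boardX_alt pos = boardX_alt (pos - 40) := by
  unfold boardX_alt
  simp only [ge_iff_le, PySem.Int.mod_eq_emod_of_pos (show (0:Int) < 40 by norm_num)]
  by_cases h2 : 40 ≤ pos - 40
  · have hm : pos % 40 = (pos - 40) % 40 := by omega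
    rw [if_pos h, if_pos h2, hm]
  · have hm : pos % 40 = pos - 40 := by omega
    rw [if_pos h, if_neg h2, hm]

theorem boardX_eq (pos : Int) : boardX pos = boardX_alt pos := by
  by_cases h40 : 40 ≤ pos
  · rw [boardX]
    have h1 : ¬ pos < 10 := by omega
    have h2 : ¬ (pos ≥ 10 ∧ pos < 20) := by omega
    have h3 : ¬ (pos ≥ 20 ∧ pos < 30) := by omega
    have h4 : ¬ (pos ≥ 30 ∧ pos < 40) := by omega
    simp only [h1, h2, h3, h4, if_neg, not_false_iff, ge_iff_le, h40, if_pos]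
    rw [boardX_alt_step pos h40]
    exact boardX_eq (pos - 40)
  · unfold boardX boardX_alt
    have hp : ¬ pos ≥ 40 := h40
    simp only [ge_iff_le, hp, if_neg, not_false_iff]
    split_ifs <;> omega
termination_by pos.toNat
decreasing_by omega

-- ===== VERDICT (by name: the statement is the Claim_ definition above) =====
theorem boardX_spec : Claim_equal_boardX := by
  intro pos _ _
  unfold Spec_boardX
  exact boardX_eq pos
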